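-- pv_equiv track=rewrite | github.com/hohuyblon-stack/sea-automation-agency | crm/pipeline_report.py | build_leads_section
-- ===== SOURCE A (Python) =====
-- L_STATUS = 9
--
-- def safe_get(row, index, default=""):
--     try:
--         return row[index]
--     except IndexError:
--         return default
--
-- def build_leads_section(leads_rows):
--     status_counts = {}
--     for row in leads_rows:
--         status = safe_get(row, L_STATUS, "Unknown").strip() or "Unknown"
--         status_counts[status] = status_counts.get(status, 0) + 1
--
--     order = [
--         "New",
--         "Contacted",
--         "Replied",
--         "Meeting",
--         "Proposal Sent",
--         "Closed Won",
--         "Closed Lost",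
--     ]
--     lines = ["LEADS"]
--     visible = {k: v for k, v in status_counts.items() if k in order}
--     others = {k: v for k, v in status_counts.items() if k not in order}
--
--     all_items = [(s, visible.get(s, 0)) for s in order if visible.get(s, 0) > 0]
--     all_items += [(k, v) for k, v in others.items()]
--
--     for i, (status, count) in enumerate(all_items):
--         prefix = "└──" if i == len(all_items) - 1 else "├──"
--         lines.append(f"  {prefix} {status}: {count}")
--
--     if not all_items:
--         lines.append("  └── (no leads yet)")
--
--     return lines
-- ===== SOURCE B (Python) =====
-- L_STATUS = 9
--
-- _ORDER = [
--     "New",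
--     "Contacted",
--     "Replied",
--     "Meeting",
--     "Proposal Sent",
--     "Closed Won",
--     "Closed Lost",
-- ]
--
--
-- def _normalize(row):
--     s = (row[L_STATUS] if len(row) > L_STATUS else "").strip()
--     return s or "Unknown"
--
--
-- def _render(items):
--     if not items:
--         return []
--     status, count = items[0]
--     if len(items) == 1:
--         return ["  └── " + status + ": " + str(count)]
--     return ["  ├── " + status + ": " + str(count)] + _render(items[1:])
--
--
-- def build_leads_section(leads_rows):
--     statuses = [_normalize(row) for row in leads_rows]
--     if not statuses:
--         return ["LEADS", "  └── (no leads yet)"]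
--     known = [s for s in _ORDER if s in statuses]
--     unknown = [s for s in dict.fromkeys(statuses) if s not in _ORDER]
--     items = [(s, statuses.count(s)) for s in known + unknown]
--     return ["LEADS"] + _render(items)
-- ===== Notes on version B (the rewrite author's own statement) =====
-- stated objective: simpler
-- what changed: B drops all three dicts (counter, visible, others): it normalizes statuses once into a list, picks known statuses by filtering the fixed order list and unknown ones by first-occurrence dedup, pairs each with list.count, and formats the lines with a recursive renderer instead of the enumerate/last-index loop.
import Mathlib
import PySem

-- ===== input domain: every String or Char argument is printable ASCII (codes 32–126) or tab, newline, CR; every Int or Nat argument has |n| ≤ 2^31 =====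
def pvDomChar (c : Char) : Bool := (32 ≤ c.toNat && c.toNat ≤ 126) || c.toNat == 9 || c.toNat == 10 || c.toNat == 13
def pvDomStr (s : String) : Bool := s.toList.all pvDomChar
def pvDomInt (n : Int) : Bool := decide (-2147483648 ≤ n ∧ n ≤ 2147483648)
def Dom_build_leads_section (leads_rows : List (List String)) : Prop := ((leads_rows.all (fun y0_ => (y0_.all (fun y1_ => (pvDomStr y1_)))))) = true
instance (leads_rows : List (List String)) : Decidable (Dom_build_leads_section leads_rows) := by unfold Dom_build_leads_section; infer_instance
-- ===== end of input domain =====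

-- B replaces A's three dicts (counter, visible, others) by a normalized status list with
-- dedup/filter/count and a recursive line renderer: simpler decomposition, same return value.

-- ===== PORT A =====
def safe_get (row : List String) (index : Int) (default : String) : String :=
  (PySem.List.pyGet? row index).getD default

def build_leads_section (leads_rows : List (List String)) : List String :=
  let status_counts : PySem.Dict String Int := leads_rows.foldl (fun d row =>
      let status :=
        let t := PySem.Str.strip (safe_get row 9 "Unknown")
        if t = "" then "Unknown" else t
      d.insert status (d.getD status 0 + 1)) PySem.Dict.empty
  let order : List String :=
    ["New", "Contacted", "Replied", "Meeting", "Proposal Sent", "Closed Won", "Closed Lost"]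
  let lines : List String := ["LEADS"]
  let visible : PySem.Dict String Int := status_counts.items.foldl
      (fun d p => if p.1 ∈ order then d.insert p.1 p.2 else d) PySem.Dict.empty
  let others : PySem.Dict String Int := status_counts.items.foldl
      (fun d p => if ¬ p.1 ∈ order then d.insert p.1 p.2 else d) PySem.Dict.empty
  let all_items : List (String × Int) :=
    (order.filterMap (fun s =>
        if visible.getD s 0 > 0 then some (s, visible.getD s 0) else none))
      ++ others.items.map (fun p => (p.1, p.2))
  let lines := (PySem.List.enumerate all_items).foldl (fun acc ip =>
      acc ++ ["  " ++ (if ip.1 = (all_items.length : Int) - 1 then "└──" else "├──")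
              ++ " " ++ ip.2.1 ++ ": " ++ PySem.Int.toStr ip.2.2]) lines
  if all_items = [] then lines ++ ["  └── (no leads yet)"] else lines

-- ===== PORT B =====
def pvOrder : List String :=
  ["New", "Contacted", "Replied", "Meeting", "Proposal Sent", "Closed Won", "Closed Lost"]

def pvNormalize (row : List String) : String :=
  let s := PySem.Str.strip (if 9 < row.length then row.getD 9 "" else "")
  if s = "" then "Unknown" else s

def pvRender : List (String × Int) → List String
  | [] => []
  | (status, count) :: rest =>
    match rest with
    | [] => ["  └── " ++ status ++ ": " ++ PySem.Int.toStr count]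
    | _ :: _ => ("  ├── " ++ status ++ ": " ++ PySem.Int.toStr count) :: pvRender rest

def build_leads_section_alt (leads_rows : List (List String)) : List String :=
  let statuses := leads_rows.map pvNormalize
  if statuses = [] then ["LEADS", "  └── (no leads yet)"]
  else
    let known := pvOrder.filter (fun s => statuses.contains s)
    let unknown := (PySem.List.dedup statuses).filter (fun s => !pvOrder.contains s)
    let items := (known ++ unknown).map (fun s => (s, (statuses.count s : Int)))
    "LEADS" :: pvRender items

-- ===== PRECONDITION & SPEC =====
def Spec_build_leads_section (leads_rows : List (List String)) (out : List String) : Prop := out = build_leads_section_alt leads_rows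
instance (leads_rows : List (List String)) (out : List String) : Decidable (Spec_build_leads_section leads_rows out) := by unfold Spec_build_leads_section; infer_instance

-- ===== CLAIM (what is proved, stated in full; the proofs are below) =====
def Claim_equal_build_leads_section : Prop := ∀ (leads_rows : List (List String)), Dom_build_leads_section leads_rows → Spec_build_leads_section leads_rows (build_leads_section leads_rows)

-- ===== LEMMAS AND PROOFS =====

theorem pv_norm_eq (row : List String) :
    (if PySem.Str.strip (safe_get row 9 "Unknown") = "" then "Unknown"
     else PySem.Str.strip (safe_get row 9 "Unknown")) = pvNormalize row := by
  unfold pvNormalize safe_get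
  by_cases h : 9 < row.length
  · simp [PySem.List.pyGet?, PySem.List.pyIdx?, h, List.getD_eq_getElem?_getD]
  · have h9 : PySem.List.pyGet? row (9 : Int) = none := by
      simp [PySem.List.pyGet?, PySem.List.pyIdx?]
      omega
    simp [h9, h]
    decide

theorem pv_render_loop (xs : List (String × Int)) (n : Nat) :
    ∀ (j : Int) (acc : List String), j + xs.length = n →
    (PySem.List.enumerate xs j).foldl (fun acc ip =>
        acc ++ ["  " ++ (if ip.1 = (n : Int) - 1 then "└──" else "├──")
                ++ " " ++ ip.2.1 ++ ": " ++ PySem.Int.toStr ip.2.2]) acc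
      = acc ++ pvRender xs := by
  induction xs with
  | nil => intro j acc h; simp [PySem.List.enumerate, pvRender]
  | cons p rest ih =>
    intro j acc h
    obtain ⟨s, c⟩ := p
    rw [PySem.List.enumerate_cons, List.foldl_cons]
    cases rest with
    | nil =>
      have hj : j = (n : Int) - 1 := by simp at h; omega
      simp [PySem.List.enumerate, pvRender, hj]
    | cons q rest' =>
      have hj : ¬ (j = (n : Int) - 1) := by simp at h; omega
      rw [ih (j + 1) _ (by simp at h ⊢; omega)]
      simp [pvRender, hj]

theorem pv_filterMap_ite {α β : Type} (l : List α) (p : α → Prop) [DecidablePred p] (f : α → β) :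
    l.filterMap (fun s => if p s then some (f s) else none)
      = (l.filter (fun s => decide (p s))).map f := by
  induction l with
  | nil => rfl
  | cons x xs ih => by_cases h : p x <;> simp [h, ih]

theorem pv_part_items (st : List String) (p : String → Prop) [DecidablePred p] :
    ((PySem.Dict.counter st : PySem.Dict String Int).items.foldl
        (fun d q => if p q.1 then d.insert q.1 q.2 else d) PySem.Dict.empty).items
      = (PySem.Dict.counter st : PySem.Dict String Int).items.filter (fun q => decide (p q.1)) := by
  have hfi := PySem.List.foldl_ite_eq_foldl_filter (α := String × Int)
    (δ := PySem.Dict String Int) (fun q => p q.1) (fun d q => d.insert q.1 q.2)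
    (PySem.Dict.counter st).items PySem.Dict.empty
  beta_reduce at hfi
  rw [hfi]
  have hfr := PySem.Dict.items_foldl_insert_fresh (κ := String) (ν := Int)
    ((PySem.Dict.counter st).items.filter (fun q => decide (p q.1)))
    (fun q => q.1) (fun q => q.2) PySem.Dict.empty
    (fun a _ => PySem.Dict.contains_empty _) ?nd
  beta_reduce at hfr
  rw [hfr]
  · simp only [show (PySem.Dict.empty : PySem.Dict String Int).items = [] from rfl,
      List.nil_append]
    simp
  case nd =>
    have hs : (((PySem.Dict.counter st : PySem.Dict String Int).items.filter
        (fun q => decide (p q.1))).map (fun q : String × Int => q.1)).Sublist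
        ((PySem.Dict.counter st : PySem.Dict String Int).items.map (fun q : String × Int => q.1)) :=
      List.Sublist.map _ List.filter_sublist
    apply List.Nodup.sublist hs
    have := PySem.Dict.nodup_keys_counter (κ := String) st
    simpa [PySem.Dict.keys] using this

theorem pv_all_items_eq (st : List String) :
    (pvOrder.filterMap (fun s =>
        if ((PySem.Dict.counter st : PySem.Dict String Int).items.foldl
              (fun d p => if p.1 ∈ pvOrder then d.insert p.1 p.2 else d)
              PySem.Dict.empty).getD s 0 > 0
        then some (s, ((PySem.Dict.counter st : PySem.Dict String Int).items.foldl
              (fun d p => if p.1 ∈ pvOrder then d.insert p.1 p.2 else d)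
              PySem.Dict.empty).getD s 0) else none))
      ++ ((PySem.Dict.counter st : PySem.Dict String Int).items.foldl
            (fun d p => if ¬ p.1 ∈ pvOrder then d.insert p.1 p.2 else d)
            PySem.Dict.empty).items.map (fun p => (p.1, p.2))
    = (pvOrder.filter (fun s => st.contains s)
        ++ (PySem.List.dedup st).filter (fun s => !pvOrder.contains s)).map
        (fun s => (s, (st.count s : Int))) := by
  have hitems := PySem.Dict.items_counter (κ := String) st
  have hVitems := pv_part_items st (fun s => s ∈ pvOrder)
  have hOitems := pv_part_items st (fun s => ¬ s ∈ pvOrder)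
  set V := ((PySem.Dict.counter st : PySem.Dict String Int).items.foldl
      (fun d p => if p.1 ∈ pvOrder then d.insert p.1 p.2 else d) PySem.Dict.empty) with hV
  set O := ((PySem.Dict.counter st : PySem.Dict String Int).items.foldl
      (fun d p => if ¬ p.1 ∈ pvOrder then d.insert p.1 p.2 else d) PySem.Dict.empty) with hO
  have hVnodup : V.keys.Nodup := by
    have hsub : (V.items.map (fun q : String × Int => q.1)).Sublist
        ((PySem.Dict.counter st : PySem.Dict String Int).items.map (fun q : String × Int => q.1)) := by
      rw [hVitems]; exact List.Sublist.map _ List.filter_sublist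
    have hnd := PySem.Dict.nodup_keys_counter (κ := String) st
    simp only [PySem.Dict.keys] at hnd ⊢
    exact hnd.sublist hsub
  have hgetD : ∀ s ∈ pvOrder, V.getD s 0 = if s ∈ st then (st.count s : Int) else 0 := by
    intro s hs
    by_cases hm : s ∈ st
    · have hmem : (s, (st.count s : Int)) ∈ V.items := by
        rw [hVitems, hitems]
        simp only [List.mem_filter, List.mem_map]
        exact ⟨⟨s, by simp [PySem.Set.mem_ofList, hm], rfl⟩, by simp [hs]⟩
      rw [PySem.Dict.getD_of_mem_items _ hmem hVnodup, if_pos hm]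
    · have hnc : V.contains s = false := by
        rw [PySem.Dict.contains_eq_decide_mem_keys]
        simp only [PySem.Dict.keys, hVitems, hitems, decide_eq_false_iff_not]
        intro hmem
        simp only [List.filter_map, List.map_map, List.mem_map, List.mem_filter,
          Function.comp, PySem.Set.mem_ofList] at hmem
        obtain ⟨k, hk, hke⟩ := hmem
        exact hm (hke ▸ hk.1)
      rw [PySem.Dict.getD_of_not_contains _ _ hnc, if_neg hm]
  have hleft : pvOrder.filterMap (fun s => if V.getD s 0 > 0 then some (s, V.getD s 0) else none)
      = (pvOrder.filter (fun s => st.contains s)).map (fun s => (s, (st.count s : Int))) := by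
    rw [List.filterMap_congr (g := fun s =>
        if s ∈ st then some (s, (st.count s : Int)) else none) ?hc]
    · rw [pv_filterMap_ite pvOrder (fun s => s ∈ st) (fun s => (s, (st.count s : Int)))]
      congr 1
      apply List.filter_congr
      intro s _
      simp
    case hc =>
      intro s hs
      rw [hgetD s hs]
      by_cases hm : s ∈ st
      · simp [hm]
      · simp [hm]
  have hright : O.items.map (fun p : String × Int => (p.1, p.2))
      = ((PySem.List.dedup st).filter (fun s => !pvOrder.contains s)).map
          (fun s => (s, (st.count s : Int))) := by
    rw [hOitems, hitems, List.filter_map, List.map_map, PySem.List.dedup_eq_ofList]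
    congr 1
    apply List.filter_congr
    intro s _
    simp
  rw [hleft, hright, ← List.map_append]

-- ===== VERDICT (by name: the statement is the Claim_ definition above) =====
theorem build_leads_section_spec : Claim_equal_build_leads_section := by
  intro rows _hdom
  unfold Spec_build_leads_section
  show build_leads_section rows = build_leads_section_alt rows
  unfold build_leads_section build_leads_section_alt
  simp only [pv_norm_eq]
  have hfm := (List.foldl_map (f := pvNormalize)
    (g := fun (d : PySem.Dict String Int) s => d.insert s (d.getD s 0 + 1))
    (l := rows) (init := PySem.Dict.empty)).symm
  beta_reduce at hfm
  rw [hfm, PySem.Dict.foldl_insert_getD_add_one_eq_counter]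
  set st := rows.map pvNormalize with hst
  rw [show (["New", "Contacted", "Replied", "Meeting", "Proposal Sent", "Closed Won",
      "Closed Lost"] : List String) = pvOrder from rfl]
  rw [pv_all_items_eq st]
  set items := (pvOrder.filter (fun s => st.contains s)
      ++ (PySem.List.dedup st).filter (fun s => !pvOrder.contains s)).map
      (fun s => (s, (st.count s : Int))) with hitemsB
  by_cases he : st = []
  · have hni : items = [] := by rw [hitemsB, he]; rfl
    rw [if_pos hni, if_pos he, hni]
    rfl
  · have hne : items ≠ [] := by
      obtain ⟨s, rest, hcons⟩ := List.exists_cons_of_ne_nil he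
      have hsmem : s ∈ st := by rw [hcons]; exact List.mem_cons_self
      by_cases ho : s ∈ pvOrder
      · have : s ∈ pvOrder.filter (fun s => st.contains s) := by
          rw [List.mem_filter]
          exact ⟨ho, by simpa using hsmem⟩
        exact List.ne_nil_of_mem (List.mem_map_of_mem (List.mem_append_left _ this))
      · have : s ∈ (PySem.List.dedup st).filter (fun s => !pvOrder.contains s) := by
          rw [List.mem_filter]
          exact ⟨by rw [PySem.List.mem_dedup]; exact hsmem, by simpa using ho⟩
        exact List.ne_nil_of_mem (List.mem_map_of_mem (List.mem_append_right _ this))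
    rw [if_neg hne, if_neg he]
    rw [pv_render_loop items items.length 0 ["LEADS"] (by simp)]
    rfl
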